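-- pv_equiv track=rewrite | github.com/G1OOO/Homework | day58/Classwork/Work.py | remove_largest_custom
-- ===== SOURCE A (Python) =====
-- def remove_largest_custom(lst, value):
--     if not lst:
--         return None
--
--     max_value = float('-inf')
--     max_index = None
--
--     for i in range(len(lst)):
--         if lst[i] > max_value:
--             max_value = lst[i]
--             max_index = i
--
--     lst.pop(max_index)
--     return lst
-- ===== SOURCE B (Python) =====
-- def remove_largest_custom(lst, value):
--     # NOTE: like A, mutates lst in place (the first occurrence of the maximum is removed).
--     if not lst:
--         return None
--     # One-pass "champion" construction: build the output directly, never computing an index.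
--     # out = elements strictly before the current champion, champ = current first maximum,
--     # tail = elements after the champion seen so far.  A strictly larger element dethrones
--     # the champion, which (with its tail) is flushed into out; ties keep the old champion,
--     # so the FIRST occurrence of the overall maximum is the one left out at the end.
--     champ = lst[0]
--     out = []
--     tail = []
--     for x in lst[1:]:
--         if x > champ:
--             out.append(champ)
--             out.extend(tail)
--             champ = x
--             tail = []
--         else:
--             tail.append(x)
--     lst[:] = out + tail
--     return lst
-- ===== Notes on version B (the rewrite author's own statement) =====
-- stated objective: alternative
-- what changed: A scans for the argmax index and then pops it (index-based two-phase removal); B never computes an index or pops: a single 'champion' pass builds the output list directly, flushing the dethroned champion and its buffered tail into the output whenever a strictly larger element appears, leaving the final champion (the first maximum) out.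
import Mathlib
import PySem

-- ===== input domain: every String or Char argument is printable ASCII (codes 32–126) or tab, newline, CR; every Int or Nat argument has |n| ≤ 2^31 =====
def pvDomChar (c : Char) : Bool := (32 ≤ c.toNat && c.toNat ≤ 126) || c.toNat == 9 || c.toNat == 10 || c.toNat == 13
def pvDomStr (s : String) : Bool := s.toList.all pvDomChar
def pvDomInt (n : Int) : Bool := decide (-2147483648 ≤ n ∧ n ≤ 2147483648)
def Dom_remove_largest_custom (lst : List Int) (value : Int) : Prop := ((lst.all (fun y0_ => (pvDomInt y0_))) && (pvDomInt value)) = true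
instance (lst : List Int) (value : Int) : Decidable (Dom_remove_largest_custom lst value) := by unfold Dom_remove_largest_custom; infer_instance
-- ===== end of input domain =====

-- ===== PORT A =====
-- the body of A's for-loop: one step updating (max_value, max_index); none = float('-inf') / None
def pvStepA (lst : List Int) (st : Option Int × Option Int) (i : Int) : Option Int × Option Int :=
  let x := PySem.List.pyGetD lst i 0   -- lst[i]; i comes from range(len(lst)), always in range, so exact
  match st.1 with
  | none => (some x, some i)           -- lst[i] > float('-inf') holds for every int
  | some m => if m < x then (some x, some i) else st

def remove_largest_custom (lst : List Int) (_value : Int) : Option (List Int) :=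
  if lst = [] then none
  else
    let st := (PySem.List.pyRange 0 (PySem.List.len lst)).foldl (pvStepA lst) (none, none)
    match st.2 with
    | none => none                     -- lst.pop(None) would raise TypeError; unreachable for nonempty lst
    | some i => (PySem.List.pop? lst i).map (fun r => r.2)

-- ===== PORT B =====
-- B's loop: out = elements before the current champion, champ = current first maximum,
-- tail = elements after it; a strictly larger element flushes champ and tail into out.
def pvGoB : List Int → Int → List Int → List Int → List Int
  | [], _champ, out, tail => out ++ tail
  | x :: rest, champ, out, tail =>
      if champ < x then pvGoB rest x (out ++ [champ] ++ tail) []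
      else pvGoB rest champ out (tail ++ [x])

def remove_largest_custom_alt (lst : List Int) (_value : Int) : Option (List Int) :=
  match lst with
  | [] => none
  | x :: t => some (pvGoB t x [] [])

-- ===== PRECONDITION & SPEC =====
def Spec_remove_largest_custom (lst : List Int) (value : Int) (out : Option (List Int)) : Prop := out = remove_largest_custom_alt lst value
instance (lst : List Int) (value : Int) (out : Option (List Int)) : Decidable (Spec_remove_largest_custom lst value out) := by unfold Spec_remove_largest_custom; infer_instance

-- ===== CLAIM (what is proved, stated in full; the proofs are below) =====
def Claim_equal_remove_largest_custom : Prop := ∀ (lst : List Int) (value : Int), Dom_remove_largest_custom lst value → Spec_remove_largest_custom lst value (remove_largest_custom lst value)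

-- ===== LEMMAS AND PROOFS =====

-- pure recursion computing what A's loop computes once the state has become (some m, some K)
def goA : List Int → Int → Int → Int → Option Int × Option Int
  | [], _, m, K => (some m, some K)
  | x :: t, i, m, K => if m < x then goA t (i + 1) x i else goA t (i + 1) m K

theorem pvFold (lst : List Int) (n : Nat) : ∀ (a : Nat) (m K : Int), lst.length = a + n →
    (PySem.List.pyRange (a : Int) (PySem.List.len lst)).foldl (pvStepA lst) (some m, some K)
      = goA (lst.drop a) (a : Int) m K := by
  induction n with
  | zero =>
    intro a m K h
    rw [PySem.List.pyRange_one_eq_nil (by simp [PySem.List.len]; omega)]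
    rw [List.drop_of_length_le (by omega)]
    rfl
  | succ k ih =>
    intro a m K h
    have ha : a < lst.length := by omega
    rw [PySem.List.pyRange_one_cons (by simp [PySem.List.len]; exact_mod_cast ha)]
    rw [List.foldl_cons, List.drop_eq_getElem_cons ha]
    have hx : PySem.List.pyGetD lst (a : Int) 0 = lst[a] := by
      rw [PySem.List.pyGetD_natCast]; exact List.getD_eq_getElem _ _ ha
    simp only [pvStepA, hx, goA]
    have hcast : ((a : Int) + 1) = (((a + 1 : Nat)) : Int) := by push_cast; ring
    split_ifs with hlt
    · rw [hcast, ih (a + 1) lst[a] (a : Int) (by omega)]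
    · rw [hcast, ih (a + 1) m K (by omega)]

theorem goA_spec : ∀ (t : List Int) (i m K : Int),
    goA t i m K = (some (t.foldl max m),
      some (if m < t.foldl max m then i + (t.idxOf (t.foldl max m) : Int) else K)) := by
  intro t
  induction t with
  | nil => intro i m K; simp [goA]
  | cons x t ih =>
    intro i m K
    simp only [goA, List.foldl_cons]
    by_cases hmx : m < x
    · rw [if_pos hmx, ih]
      have hmax : max m x = x := max_eq_right (le_of_lt hmx)
      rw [hmax]
      have hxM : x ≤ t.foldl max x := (PySem.List.le_foldl_max t x).1
      have hm : m < t.foldl max x := lt_of_lt_of_le hmx hxM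
      rw [if_pos hm]
      by_cases hxe : x = t.foldl max x
      · rw [if_neg (by omega)]
        have : (x :: t).idxOf (t.foldl max x) = 0 := by
          simp [← hxe]
        rw [this]; simp
      · have hxlt : x < t.foldl max x := lt_of_le_of_ne hxM hxe
        rw [if_pos hxlt]
        have : (x :: t).idxOf (t.foldl max x) = t.idxOf (t.foldl max x) + 1 := by
          simp [hxe]
        rw [this]
        simp only [Prod.mk.injEq, Option.some.injEq, true_and]
        push_cast; ring
    · rw [if_neg hmx, ih]
      have hmax : max m x = m := max_eq_left (by omega)
      rw [hmax]
      by_cases hm : m < t.foldl max m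
      · rw [if_pos hm, if_pos hm]
        have hxne : x ≠ t.foldl max m := by omega
        have : (x :: t).idxOf (t.foldl max m) = t.idxOf (t.foldl max m) + 1 := by
          simp [hxne]
        rw [this]
        simp only [Prod.mk.injEq, Option.some.injEq, true_and]
        push_cast; ring
      · rw [if_neg hm, if_neg hm]

-- B's loop removes exactly the final champion: with every element of tail ≤ champ,
-- the result is out ++ (the suffix champ :: tail ++ rest with the first occurrence of its maximum erased).
theorem pvGoB_spec : ∀ (rest : List Int) (champ : Int) (out tail : List Int),
    (∀ y ∈ tail, y ≤ champ) →
    pvGoB rest champ out tail = out ++ (champ :: (tail ++ rest)).erase (rest.foldl max champ) := by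
  intro rest
  induction rest with
  | nil =>
    intro c out tail _
    simp [pvGoB]
  | cons x r ih =>
    intro c out tail htail
    simp only [pvGoB, List.foldl_cons]
    by_cases hcx : c < x
    · rw [if_pos hcx, ih x _ [] (by simp)]
      have hmax : max c x = x := max_eq_right (le_of_lt hcx)
      rw [hmax]
      set M := r.foldl max x with hM
      have hxM : x ≤ M := (PySem.List.le_foldl_max r x).1
      have hnot : M ∉ c :: tail := by
        intro hmem
        rcases List.mem_cons.mp hmem with h | h
        · omega
        · have := htail _ h; omega
      have : (c :: (tail ++ x :: r)).erase M = (c :: tail) ++ (x :: r).erase M := by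
        have : c :: (tail ++ x :: r) = (c :: tail) ++ (x :: r) := by simp
        rw [this, List.erase_append_right _ hnot]
      rw [this]
      simp
    · rw [if_neg hcx, ih c out (tail ++ [x])
        (by intro y hy; rcases List.mem_append.mp hy with h | h
            · exact htail y h
            · simp at h; omega)]
      have hmax : max c x = c := max_eq_left (by omega)
      rw [hmax]
      have : (tail ++ [x]) ++ r = tail ++ x :: r := by simp
      rw [this]

theorem pvIdxOf_lt_length (l : List Int) (v : Int) (h : v ∈ l) : l.idxOf v < l.length :=
  List.idxOf_lt_length_of_mem h

-- ===== VERDICT (by name: the statement is the Claim_ definition above) =====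
theorem remove_largest_custom_spec : Claim_equal_remove_largest_custom := by
  intro lst value _
  unfold Spec_remove_largest_custom
  cases lst with
  | nil => rfl
  | cons x t =>
    have hne : (x :: t) ≠ ([] : List Int) := by simp
    unfold remove_largest_custom remove_largest_custom_alt
    rw [if_neg hne]
    -- evaluate A's loop
    have h0 : (0 : Int) < PySem.List.len (x :: t) := by
      simp [PySem.List.len]
    rw [PySem.List.pyRange_one_cons h0, List.foldl_cons]
    have hstep0 : pvStepA (x :: t) (none, none) 0 = (some x, some 0) := by
      simp [pvStepA, PySem.List.pyGetD]
    rw [hstep0]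
    have h01 : ((0 : Int) + 1) = ((1 : Nat) : Int) := by norm_num
    rw [h01, pvFold (x :: t) t.length 1 x 0 (by simp only [List.length_cons]; omega)]
    simp only [List.drop_succ_cons, List.drop_zero]
    rw [goA_spec]
    set M := t.foldl max x with hM
    have hxM : x ≤ M := (PySem.List.le_foldl_max t x).1
    have hmem : M ∈ x :: t := by
      rcases PySem.List.foldl_max_mem t x with h | h
      · rw [hM, h]; exact List.mem_cons_self
      · rw [hM]; exact List.mem_cons_of_mem _ h
    -- A's computed index equals the first index of the maximum
    have hidx : (if x < M then (1 : Int) + ((t.idxOf M : Nat) : Int) else 0)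
        = (((x :: t).idxOf M : Nat) : Int) := by
      by_cases hlt : x < M
      · rw [if_pos hlt]
        have : (x :: t).idxOf M = t.idxOf M + 1 := by
          simp [show x ≠ M from by omega]
        rw [this]; push_cast; ring
      · have hxe : x = M := le_antisymm hxM (by omega)
        rw [if_neg hlt]
        have : (x :: t).idxOf M = 0 := by simp [hxe]
        rw [this]; simp
    simp only [Nat.cast_one]
    rw [hidx]
    -- A pops at the first index of the maximum, yielding erase M
    have hlen : (x :: t).idxOf M < (x :: t).length := pvIdxOf_lt_length _ _ hmem
    show (PySem.List.pop? (x :: t) (((x :: t).idxOf M : Nat) : Int)).map (fun r => r.2)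
        = some (pvGoB t x [] [])
    rw [PySem.List.pop?_natCast _ _ hlen]
    simp only [Option.map_some]
    rw [List.eraseIdx_idxOf_eq_erase]
    -- B's champion pass also yields erase M
    rw [pvGoB_spec t x [] [] (by simp)]
    simp [hM]
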